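-- pv_equiv track=rewrite | github.com/LiuJiang20/douDiZhuAI | utility.py | getAllPairs
-- ===== SOURCE A (Python) =====
-- from typing import List, Tuple
--
-- def getAllPairs(hand: List[int], lastPlay=None):
--     pairs = []
--     handSize = len(hand)
--     pos = 1
--     lastIndex = -1
--     while pos < handSize:
--         if hand[pos] == hand[pos - 1] and pos - 1 != lastIndex:
--             if not lastPlay or hand[pos] > lastPlay[0]:
--                 pairs.append((hand[pos],) * 2)
--             lastIndex = pos
--         pos += 1
--     return pairs
-- ===== SOURCE B (Python) =====
-- from itertools import groupby
--
-- def getAllPairs(hand, lastPlay=None):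
--     pairs = []
--     for v, grp in groupby(hand):
--         if not lastPlay or v > lastPlay[0]:
--             pairs.extend([(v, v)] * (len(list(grp)) // 2))
--     return pairs
-- ===== Notes on version B (the rewrite author's own statement) =====
-- stated objective: simpler
-- what changed: Replaced the index/lastIndex parity-bookkeeping while-loop with an itertools.groupby pass over maximal runs, emitting len(run)//2 pairs per run that beats lastPlay.
import Mathlib
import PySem

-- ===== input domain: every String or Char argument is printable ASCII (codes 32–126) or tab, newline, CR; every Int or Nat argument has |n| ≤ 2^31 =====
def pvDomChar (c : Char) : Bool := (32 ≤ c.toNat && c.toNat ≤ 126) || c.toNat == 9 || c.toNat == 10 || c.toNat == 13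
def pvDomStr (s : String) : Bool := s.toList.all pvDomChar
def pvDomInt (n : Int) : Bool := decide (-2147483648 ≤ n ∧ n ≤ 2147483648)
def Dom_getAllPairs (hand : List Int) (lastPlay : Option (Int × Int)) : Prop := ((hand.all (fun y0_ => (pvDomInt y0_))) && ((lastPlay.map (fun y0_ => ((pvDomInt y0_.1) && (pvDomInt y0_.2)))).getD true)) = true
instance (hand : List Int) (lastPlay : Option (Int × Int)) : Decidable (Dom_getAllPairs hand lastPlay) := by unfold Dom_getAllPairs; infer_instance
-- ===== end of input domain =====

-- B replaces A's pos/lastIndex parity bookkeeping by a groupby over maximal runs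
-- (len(run)//2 pairs per qualifying run); same return value, simpler decomposition.

-- ===== PORT A =====
-- while loop of A: state (pos, lastIndex, pairs); hand[pos] for 1 ≤ pos < handSize is
-- always in range, so List.getD is exact here.
def getAllPairsLoop (hand : List Int) (lastPlay : Option (Int × Int)) (handSize : Nat)
    (pos : Nat) (lastIndex : Int) (pairs : List (Int × Int)) : List (Int × Int) :=
  if _h : pos < handSize then
    if hand.getD pos 0 = hand.getD (pos - 1) 0 ∧ (pos : Int) - 1 ≠ lastIndex then
      let pairs' :=
        if (match lastPlay with | none => true | some lp => decide (lp.1 < hand.getD pos 0)) = true then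
          pairs ++ [(hand.getD pos 0, hand.getD pos 0)]
        else pairs
      getAllPairsLoop hand lastPlay handSize (pos + 1) (pos : Int) pairs'
    else
      getAllPairsLoop hand lastPlay handSize (pos + 1) lastIndex pairs
  else pairs
termination_by handSize - pos

def getAllPairs (hand : List Int) (lastPlay : Option (Int × Int)) : List (Int × Int) :=
  getAllPairsLoop hand lastPlay hand.length 1 (-1) []

-- ===== PORT B =====
-- Source B iterates groupby(hand): each maximal run (value x, length 1 + |takeWhile|)
-- contributes len(run) // 2 pairs when it beats lastPlay.
def getAllPairs_alt (hand : List Int) (lastPlay : Option (Int × Int)) : List (Int × Int) :=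
  match hand with
  | [] => []
  | x :: xs =>
    (if (match lastPlay with | none => true | some lp => decide (lp.1 < x)) = true then
        List.replicate (((xs.takeWhile (fun y => y == x)).length + 1) / 2) (x, x)
      else []) ++ getAllPairs_alt (xs.dropWhile (fun y => y == x)) lastPlay
termination_by hand.length
decreasing_by
  simp only [List.length_cons]
  exact Nat.lt_succ_of_le (List.length_dropWhile_le _ _)

-- ===== PRECONDITION & SPEC =====
def Spec_getAllPairs (hand : List Int) (lastPlay : Option (Int × Int)) (out : List (Int × Int)) : Prop := out = getAllPairs_alt hand lastPlay
instance (hand : List Int) (lastPlay : Option (Int × Int)) (out : List (Int × Int)) : Decidable (Spec_getAllPairs hand lastPlay out) := by unfold Spec_getAllPairs; infer_instance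

-- ===== CLAIM (what is proved, stated in full; the proofs are below) =====
def Claim_equal_getAllPairs : Prop := ∀ (hand : List Int) (lastPlay : Option (Int × Int)), Dom_getAllPairs hand lastPlay → Spec_getAllPairs hand lastPlay (getAllPairs hand lastPlay)

-- ===== LEMMAS AND PROOFS =====

-- proof-side abbreviation of the shared "beats lastPlay" test
def pairOk (lastPlay : Option (Int × Int)) (x : Int) : Bool :=
  match lastPlay with | none => true | some lp => decide (lp.1 < x)

-- proof-side reformulation of A's loop as a recursion over the suffix of the hand:
-- prev is hand[pos-1], avail says "position pos-1 was not consumed as a pair's right half".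
def scanB (lp : Option (Int × Int)) : Int → Bool → List Int → List (Int × Int)
  | _, _, [] => []
  | prev, avail, x :: xs =>
    if x = prev ∧ avail = true then
      (if pairOk lp x = true then [(x, x)] else []) ++ scanB lp x false xs
    else scanB lp x true xs

theorem loop_eq_scanB (hand : List Int) (lp : Option (Int × Int)) :
    ∀ n pos (lastIndex : Int) (pairs : List (Int × Int)),
      hand.length - pos = n → 1 ≤ pos → lastIndex < (pos : Int) →
      getAllPairsLoop hand lp hand.length pos lastIndex pairs
        = pairs ++ scanB lp (hand.getD (pos - 1) 0)
            (decide ((pos : Int) - 1 ≠ lastIndex)) (hand.drop pos) := by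
  intro n
  induction n with
  | zero =>
    intro pos lastIndex pairs hn hpos _
    have hge : hand.length ≤ pos := by omega
    rw [getAllPairsLoop.eq_def]
    simp [Nat.not_lt.mpr hge, List.drop_eq_nil_of_le hge, scanB]
  | succ n ih =>
    intro pos lastIndex pairs hn hpos hlt
    have hposlt : pos < hand.length := by omega
    have hdrop : hand.drop pos = hand.getD pos 0 :: hand.drop (pos + 1) := by
      rw [List.getD_eq_getElem hand 0 hposlt]
      exact (List.drop_eq_getElem_cons hposlt)
    rw [getAllPairsLoop.eq_def]
    simp only [hposlt, dif_pos]
    by_cases hc : hand.getD pos 0 = hand.getD (pos - 1) 0 ∧ (pos : Int) - 1 ≠ lastIndex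
    · rw [if_pos hc]
      rw [ih (pos + 1) (pos : Int) _ (by omega) (by omega) (by omega)]
      rw [hdrop, scanB]
      have havail : (decide ((pos : Int) - 1 ≠ lastIndex)) = true := by
        simpa using hc.2
      have havail' : (decide ((((pos + 1 : Nat)) : Int) - 1 ≠ (pos : Int))) = false := by
        push_cast; simp
      have hprev : pos + 1 - 1 = pos := by omega
      simp only [hprev, havail', hc.1, havail, and_self, if_true, pairOk]
      split_ifs with hp
      · simp
      · simp
    · rw [if_neg hc]
      have h1 : hand.length - (pos + 1) = n := by omega
      have h3 : lastIndex < ((pos + 1 : Nat) : Int) := by push_cast; omega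
      rw [ih (pos + 1) lastIndex _ h1 (by omega) h3]
      rw [hdrop, scanB]
      have hcond : ¬ (hand.getD pos 0 = hand.getD (pos - 1) 0 ∧
          (decide ((pos : Int) - 1 ≠ lastIndex)) = true) := by
        intro h
        exact hc ⟨h.1, by simpa using h.2⟩
      rw [if_neg hcond]
      have hne : (decide ((((pos + 1 : Nat)) : Int) - 1 ≠ lastIndex)) = true := by
        rw [decide_eq_true_iff]
        push_cast
        omega
      have hprev : pos + 1 - 1 = pos := by omega
      simp only [hprev, hne]

-- the behaviour of scanB on one maximal run of x's (rest starts with a value ≠ x)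
theorem scan_run (lp : Option (Int × Int)) (x : Int) :
    ∀ (k : Nat) (rest : List Int),
      (∀ y, rest.head? = some y → y ≠ x) →
      scanB lp x true (List.replicate k x ++ rest)
          = (if pairOk lp x = true then List.replicate ((k + 1) / 2) (x, x) else [])
            ++ (match rest with | [] => [] | y :: ys => scanB lp y true ys)
      ∧ scanB lp x false (List.replicate k x ++ rest)
          = (if pairOk lp x = true then List.replicate (k / 2) (x, x) else [])
            ++ (match rest with | [] => [] | y :: ys => scanB lp y true ys) := by
  intro k
  induction k with
  | zero =>
    intro rest hrest
    constructor <;>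
    · cases rest with
      | nil => simp [scanB]
      | cons y ys =>
        have hy : y ≠ x := hrest y rfl
        simp [scanB, hy]
  | succ k ih =>
    intro rest hrest
    obtain ⟨ihT, ihF⟩ := ih rest hrest
    constructor
    · rw [List.replicate_succ, List.cons_append, scanB, if_pos ⟨rfl, rfl⟩, ihF]
      by_cases hp : pairOk lp x = true
      · simp only [hp, if_pos]
        rw [show (k + 1 + 1) / 2 = k / 2 + 1 by omega]
        simp [List.replicate_succ]
      · simp [hp]
    · rw [List.replicate_succ, List.cons_append, scanB,
        if_neg (by simp), ihT]

theorem takeWhile_eq_replicate (x : Int) (xs : List Int) :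
    xs.takeWhile (fun y => y == x) = List.replicate (xs.takeWhile (fun y => y == x)).length x := by
  apply List.eq_replicate_of_mem
  intro y hy
  have := List.mem_takeWhile_imp hy
  simpa using this

theorem dropWhile_head_ne (x : Int) (xs : List Int) :
    ∀ y, (xs.dropWhile (fun y => y == x)).head? = some y → y ≠ x := by
  intro y hy
  have := List.head?_dropWhile_not (fun y => y == x) xs
  rw [hy] at this
  simpa using this

theorem startScan_eq (lp : Option (Int × Int)) :
    ∀ (n : Nat) (hand : List Int), hand.length ≤ n →
      (match hand with | [] => [] | y :: ys => scanB lp y true ys)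
        = getAllPairs_alt hand lp := by
  intro n
  induction n with
  | zero =>
    intro hand h
    rw [List.length_eq_zero_iff.mp (Nat.le_zero.mp h), getAllPairs_alt.eq_def]
  | succ n ih =>
    intro hand hlen
    match hand with
    | [] => rw [getAllPairs_alt.eq_def]
    | x :: xs =>
      rw [getAllPairs_alt.eq_def]
      show scanB lp x true xs = _
      have hsplit : xs = xs.takeWhile (fun y => y == x) ++ xs.dropWhile (fun y => y == x) :=
        (List.takeWhile_append_dropWhile).symm
      have hrun := scan_run lp x (xs.takeWhile (fun y => y == x)).length
        (xs.dropWhile (fun y => y == x)) (dropWhile_head_ne x xs)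
      have hscan : scanB lp x true xs
          = (if pairOk lp x = true then
              List.replicate (((xs.takeWhile (fun y => y == x)).length + 1) / 2) (x, x) else [])
            ++ (match xs.dropWhile (fun y => y == x) with
                | [] => [] | y :: ys => scanB lp y true ys) := by
        conv_lhs => rw [hsplit, takeWhile_eq_replicate x xs]
        exact hrun.1
      rw [hscan, ih (xs.dropWhile (fun y => y == x))
        (by
          have := List.length_dropWhile_le (fun y => y == x) xs
          simp only [List.length_cons] at hlen; omega)]
      unfold pairOk
      rfl

-- ===== VERDICT (by name: the statement is the Claim_ definition above) =====
theorem getAllPairs_spec : Claim_equal_getAllPairs := by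
  intro hand lastPlay _
  unfold Spec_getAllPairs getAllPairs
  cases hand with
  | nil => rw [getAllPairsLoop.eq_def]; simp [getAllPairs_alt]
  | cons x xs =>
    rw [loop_eq_scanB (x :: xs) lastPlay (x :: xs).length.pred 1 (-1) []
      (by simp) (by omega) (by norm_num)]
    simpa using startScan_eq lastPlay (x :: xs).length (x :: xs) le_rfl
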